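-- pv_equiv track=rewrite | github.com/kcsheraj/Codepath | Week3/Session 1/Interview.py | find_balanced_subsequence
-- ===== SOURCE A (Python) =====
-- from collections import Counter
--
-- def find_balanced_subsequence(art_pieces):
--     # num : occurence
--     # {1 : 1,
--     #  3 : 2,
--     #  2 : 3,
--     #  5 : 1,
--     #  7 : 1}
--
--     price_freq = dict(Counter(art_pieces))
--
--     output = 0
--     for price in list(set(art_pieces)): #[1, 3, 2, 5, 7]
--
--         if price in price_freq.keys() and price+1 in price_freq.keys():
--             output = max(price_freq[price] + price_freq[price + 1], output)
--
--
--         if price in price_freq.keys() and price-1 in price_freq.keys():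
--             output = max(price_freq[price] + price_freq[price - 1], output)
--
--     return output
-- ===== SOURCE B (Python) =====
-- from collections import Counter
--
-- def find_balanced_subsequence(art_pieces):
--     freq = Counter(art_pieces)
--     vals = sorted(freq)
--     best = 0
--     for a, b in zip(vals, vals[1:]):
--         if b == a + 1:
--             best = max(best, freq[a] + freq[b])
--     return best
-- ===== Notes on version B (the rewrite author's own statement) =====
-- stated objective: alternative
-- what changed: Instead of probing the dict for price+1 and price-1 from every distinct value, B sorts the distinct values once and takes the best frequency sum over adjacent sorted pairs that differ by exactly 1.
import Mathlib
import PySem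

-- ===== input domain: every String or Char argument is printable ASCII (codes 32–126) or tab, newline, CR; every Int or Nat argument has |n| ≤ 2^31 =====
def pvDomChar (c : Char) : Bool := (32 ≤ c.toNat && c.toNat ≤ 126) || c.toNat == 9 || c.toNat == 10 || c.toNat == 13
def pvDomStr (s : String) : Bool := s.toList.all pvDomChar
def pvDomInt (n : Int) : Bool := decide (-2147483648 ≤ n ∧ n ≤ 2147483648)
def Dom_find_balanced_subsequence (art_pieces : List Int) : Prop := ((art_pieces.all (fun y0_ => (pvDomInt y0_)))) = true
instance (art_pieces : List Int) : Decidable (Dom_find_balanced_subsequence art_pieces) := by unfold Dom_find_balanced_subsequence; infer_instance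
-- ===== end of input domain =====

-- B replaces A's per-value probing of price+1 and price-1 in the frequency dict by one scan
-- over adjacent pairs of the sorted distinct values (objective: alternative decomposition).
-- A iterates over a Python set; its result is a max, hence independent of that iteration order.

-- ===== PORT A =====
def find_balanced_subsequence (art_pieces : List Int) : Int :=
  let price_freq := PySem.Dict.counter art_pieces
  (PySem.Set.ofList art_pieces).foldl (fun output price =>
    let output :=
      if price_freq.contains price && price_freq.contains (price + 1) then
        max (price_freq.getD price 0 + price_freq.getD (price + 1) 0) output
      else output
    if price_freq.contains price && price_freq.contains (price - 1) then
      max (price_freq.getD price 0 + price_freq.getD (price - 1) 0) output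
    else output) 0

-- ===== PORT B =====
def find_balanced_subsequence_alt (art_pieces : List Int) : Int :=
  let freq := PySem.Dict.counter art_pieces
  let vals := PySem.List.sorted freq.keys (fun x => x) false
  (vals.zip (PySem.List.slice vals (some 1) none)).foldl (fun best ab =>
    if ab.2 == ab.1 + 1 then max best (freq.getD ab.1 0 + freq.getD ab.2 0) else best) 0

-- ===== PRECONDITION & SPEC =====
def Spec_find_balanced_subsequence (art_pieces : List Int) (out : Int) : Prop := out = find_balanced_subsequence_alt art_pieces
instance (art_pieces : List Int) (out : Int) : Decidable (Spec_find_balanced_subsequence art_pieces out) := by unfold Spec_find_balanced_subsequence; infer_instance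

-- ===== CLAIM (what is proved, stated in full; the proofs are below) =====
def Claim_equal_find_balanced_subsequence : Prop := ∀ (art_pieces : List Int), Dom_find_balanced_subsequence art_pieces → Spec_find_balanced_subsequence art_pieces (find_balanced_subsequence art_pieces)

-- ===== LEMMAS AND PROOFS =====

-- Generic facts about folds of shape `foldl step acc` where each step only raises the accumulator.
theorem foldl_step_ge {α : Type} (step : Int → α → Int) (h1 : ∀ o x, o ≤ step o x) :
    ∀ (L : List α) (acc : Int), acc ≤ L.foldl step acc := by
  intro L
  induction L with
  | nil => intro acc; simp
  | cons a t ih => intro acc; exact le_trans (h1 acc a) (ih (step acc a))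

theorem foldl_step_bound {α : Type} (step : Int → α → Int) (C : α → Prop) (g : α → Int)
    (h1 : ∀ o x, o ≤ step o x) (h3 : ∀ o x, C x → g x ≤ step o x) :
    ∀ (L : List α) (acc : Int) (x : α), x ∈ L → C x → g x ≤ L.foldl step acc := by
  intro L
  induction L with
  | nil => intro acc x hx; simp at hx
  | cons a t ih =>
    intro acc x hx hc
    rcases List.mem_cons.mp hx with h | h
    · subst h
      exact le_trans (h3 acc x hc) (foldl_step_ge step h1 t (step acc x))
    · exact ih (step acc a) x h hc

theorem foldl_inv {α : Type} (step : Int → α → Int) (P : Int → Prop) :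
    ∀ (L : List α), (∀ o x, x ∈ L → P o → P (step o x)) →
      ∀ (acc : Int), P acc → P (L.foldl step acc) := by
  intro L
  induction L with
  | nil => intro _ acc h; exact h
  | cons a t ih =>
    intro hstep acc h
    exact ih (fun o x hx => hstep o x (List.mem_cons_of_mem a hx)) (step acc a)
      (hstep acc a List.mem_cons_self h)

-- In a strictly increasing list, two consecutive integers that both occur are adjacent.
theorem adj_of_mem_pairwise_lt :
    ∀ (l : List Int), l.Pairwise (· < ·) → ∀ x : Int, x ∈ l → x + 1 ∈ l → (x, x + 1) ∈ l.zip l.tail := by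
  intro l
  induction l with
  | nil => intro _ x hx; simp at hx
  | cons a t ih =>
    intro hp x hx hx1
    have hpa : ∀ y ∈ t, a < y := (List.pairwise_cons.mp hp).1
    have hpt : t.Pairwise (· < ·) := (List.pairwise_cons.mp hp).2
    rcases List.mem_cons.mp hx with rfl | hxt
    · -- x = a : x+1 must be the head of t
      have hx1t : x + 1 ∈ t := by
        rcases List.mem_cons.mp hx1 with h | h
        · omega
        · exact h
      cases t with
      | nil => simp at hx1t
      | cons b t' =>
        have hb : b = x + 1 := by
          have h1 : x < b := hpa b List.mem_cons_self
          rcases List.mem_cons.mp hx1t with h | h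
          · omega
          · have := (List.pairwise_cons.mp hpt).1 _ h; omega
        subst hb
        simp [List.zip]
    · -- x in the tail; x+1 is too (a < x rules out a = x+1)
      have hax : a < x := hpa x hxt
      have hx1t : x + 1 ∈ t := by
        rcases List.mem_cons.mp hx1 with h | h
        · omega
        · exact h
      have hmem := ih hpt x hxt hx1t
      cases t with
      | nil => simp at hxt
      | cons b t' => exact List.mem_cons_of_mem _ hmem

-- membership in B's sorted value list is membership in the input
theorem mem_vals_iff (art_pieces : List Int) (x : Int) :
    x ∈ PySem.List.sorted (PySem.Dict.counter art_pieces).keys (fun x => x) false ↔ x ∈ art_pieces := by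
  rw [PySem.List.mem_sorted, PySem.Dict.keys_counter, PySem.Set.mem_ofList]

-- ===== VERDICT (by name: the statement is the Claim_ definition above) =====
theorem find_balanced_subsequence_spec : Claim_equal_find_balanced_subsequence := by
  intro xs _
  unfold Spec_find_balanced_subsequence find_balanced_subsequence find_balanced_subsequence_alt
  simp only []
  set f : Int → Int := fun v => ((xs.count v : Nat) : Int) with hf
  set stepA : Int → Int → Int := fun output price =>
    let output :=
      if (PySem.Dict.counter xs).contains price && (PySem.Dict.counter xs).contains (price + 1) then
        max ((PySem.Dict.counter xs).getD price 0 + (PySem.Dict.counter xs).getD (price + 1) 0) output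
      else output
    if (PySem.Dict.counter xs).contains price && (PySem.Dict.counter xs).contains (price - 1) then
      max ((PySem.Dict.counter xs).getD price 0 + (PySem.Dict.counter xs).getD (price - 1) 0) output
    else output with hstepA
  set vals := PySem.List.sorted (PySem.Dict.counter xs).keys (fun x => x) false with hvals
  set stepB : Int → Int × Int → Int := fun best ab =>
    if ab.2 == ab.1 + 1 then max best ((PySem.Dict.counter xs).getD ab.1 0 + (PySem.Dict.counter xs).getD ab.2 0) else best with hstepB
  -- the zipped pair list of B
  have hslice : PySem.List.slice vals (some 1) none = vals.tail := by
    rw [PySem.List.slice_from vals (by norm_num : (0:Int) ≤ 1)]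
    simp
  rw [hslice]
  -- basic step facts
  have hA1 : ∀ o x, o ≤ stepA o x := by
    intro o x; simp only [hstepA]; split_ifs <;> simp
  have hB1 : ∀ o x, o ≤ stepB o x := by
    intro o x; simp only [hstepB]; split_ifs <;> simp
  have hcont : ∀ v : Int, ((PySem.Dict.counter xs).contains v = true) ↔ v ∈ xs := by
    intro v; rw [PySem.Dict.contains_counter]; exact List.contains_iff_mem
  have hgetD : ∀ v : Int, (PySem.Dict.counter xs).getD v 0 = f v := by
    intro v; rw [PySem.Dict.getD_counter]
  have hvals_mem : ∀ x : Int, x ∈ vals ↔ x ∈ xs := fun x => mem_vals_iff xs x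
  have hvals_sorted : vals.Pairwise (· < ·) := by
    rw [hvals, PySem.Dict.keys_counter]
    exact PySem.List.sorted_ofList_pairwise_lt xs
  -- the invariant: the accumulator is 0 or the frequency sum of some consecutive pair of the input
  set PA : Int → Prop := fun m => m = 0 ∨ ∃ x : Int, x ∈ xs ∧ x + 1 ∈ xs ∧ m = f x + f (x + 1) with hPAdef
  -- A's step: bound and invariant preservation
  have hA3 : ∀ o x, (x ∈ xs ∧ x + 1 ∈ xs) → f x + f (x + 1) ≤ stepA o x := by
    intro o x ⟨h1, h2⟩
    simp only [hstepA]
    have hin : f x + f (x + 1) ≤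
        (if ((PySem.Dict.counter xs).contains x && (PySem.Dict.counter xs).contains (x + 1)) = true then
          max ((PySem.Dict.counter xs).getD x 0 + (PySem.Dict.counter xs).getD (x + 1) 0) o
        else o) := by
      rw [if_pos (by rw [Bool.and_eq_true, hcont, hcont]; exact ⟨h1, h2⟩), hgetD, hgetD]
      simp
    refine le_trans hin ?_
    split_ifs <;> simp
  have hA2 : ∀ o x, PA o → PA (stepA o x) := by
    intro o x ho
    simp only [hstepA]
    have step2 : ∀ o1, PA o1 →
        PA (if (PySem.Dict.counter xs).contains x && (PySem.Dict.counter xs).contains (x - 1) then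
              max ((PySem.Dict.counter xs).getD x 0 + (PySem.Dict.counter xs).getD (x - 1) 0) o1
            else o1) := by
      intro o1 ho1
      by_cases hc : ((PySem.Dict.counter xs).contains x && (PySem.Dict.counter xs).contains (x - 1)) = true
      · rw [if_pos hc]
        have hc' := hc
        rw [Bool.and_eq_true] at hc'
        rcases hc' with ⟨hcx, hcm⟩
        rcases max_choice ((PySem.Dict.counter xs).getD x 0 + (PySem.Dict.counter xs).getD (x - 1) 0) o1 with h | h
        · rw [h, hgetD, hgetD]
          right
          refine ⟨x - 1, (hcont _).mp hcm, ?_, ?_⟩ <;> rw [(by omega : x - 1 + 1 = x)]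
          · exact (hcont x).mp hcx
          · exact add_comm (f x) (f (x - 1))
        · rw [h]; exact ho1
      · rw [if_neg hc]; exact ho1
    apply step2
    by_cases hc : ((PySem.Dict.counter xs).contains x && (PySem.Dict.counter xs).contains (x + 1)) = true
    · rw [if_pos hc]
      have hc' := hc
      rw [Bool.and_eq_true] at hc'
      rcases hc' with ⟨hcx, hcp⟩
      rcases max_choice ((PySem.Dict.counter xs).getD x 0 + (PySem.Dict.counter xs).getD (x + 1) 0) o with h | h
      · rw [h, hgetD, hgetD]
        right
        exact ⟨x, (hcont x).mp hcx, (hcont _).mp hcp, rfl⟩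
      · rw [h]; exact ho
    · rw [if_neg hc]; exact ho
  -- B's step facts
  have hB3 : ∀ o (ab : Int × Int), ab.2 = ab.1 + 1 → f ab.1 + f ab.2 ≤ stepB o ab := by
    intro o ab h
    simp only [hstepB]
    rw [if_pos (by simpa using h), hgetD, hgetD]
    simp
  have hB2 : ∀ o (ab : Int × Int), ab ∈ vals.zip vals.tail → PA o → PA (stepB o ab) := by
    intro o ab hab ho
    simp only [hstepB]
    by_cases h : (ab.2 == ab.1 + 1) = true
    · rw [if_pos h]
      have h2 : ab.2 = ab.1 + 1 := by simpa using h
      rcases max_choice o ((PySem.Dict.counter xs).getD ab.1 0 + (PySem.Dict.counter xs).getD ab.2 0) with hm | hm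
      · rw [hm]; exact ho
      · rw [hm, hgetD, hgetD]
        right
        have h1m : ab.1 ∈ xs := (hvals_mem ab.1).mp (List.of_mem_zip hab).1
        have h2m : ab.2 ∈ xs := (hvals_mem ab.2).mp (List.mem_of_mem_tail (List.of_mem_zip hab).2)
        exact ⟨ab.1, h1m, by rwa [← h2], by rw [← h2]⟩
    · rw [if_neg h]; exact ho
  -- name the two results
  set RA := (PySem.Set.ofList xs).foldl stepA 0 with hRA
  set RB := (vals.zip vals.tail).foldl stepB 0 with hRB
  -- every consecutive pair of the input bounds both results
  have hpair_le_RB : ∀ x : Int, x ∈ xs → x + 1 ∈ xs → f x + f (x + 1) ≤ RB := by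
    intro x h1 h2
    have hz : (x, x + 1) ∈ vals.zip vals.tail :=
      adj_of_mem_pairwise_lt vals hvals_sorted x ((hvals_mem x).mpr h1) ((hvals_mem _).mpr h2)
    exact foldl_step_bound stepB (fun ab => ab.2 = ab.1 + 1) (fun ab => f ab.1 + f ab.2)
      hB1 hB3 _ 0 (x, x + 1) hz rfl
  have hpair_le_RA : ∀ x : Int, x ∈ xs → x + 1 ∈ xs → f x + f (x + 1) ≤ RA := by
    intro x h1 h2
    exact foldl_step_bound stepA (fun x => x ∈ xs ∧ x + 1 ∈ xs) (fun x => f x + f (x + 1))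
      hA1 hA3 _ 0 x ((PySem.Set.mem_ofList xs x).mpr h1) ⟨h1, h2⟩
  have hRA0 : (0:Int) ≤ RA := foldl_step_ge stepA hA1 _ 0
  have hRB0 : (0:Int) ≤ RB := foldl_step_ge stepB hB1 _ 0
  have hPA : PA RA :=
    foldl_inv stepA PA (PySem.Set.ofList xs) (fun o x _ => hA2 o x) 0 (Or.inl rfl)
  have hPB : PA RB := foldl_inv stepB PA (vals.zip vals.tail) hB2 0 (Or.inl rfl)
  have hle1 : RA ≤ RB := by
    rcases hPA with h | ⟨x, hx, hx1, he⟩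
    · rw [h]; exact hRB0
    · rw [he]; exact hpair_le_RB x hx hx1
  have hle2 : RB ≤ RA := by
    rcases hPB with h | ⟨x, hx, hx1, he⟩
    · rw [h]; exact hRA0
    · rw [he]; exact hpair_le_RA x hx hx1
  exact le_antisymm hle1 hle2
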